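-- pv_equiv track=rewrite | github.com/Deenyoro/Scrivox | transcribe.py | rename_speakers
-- ===== SOURCE A (Python) =====
-- def rename_speakers(segments, speaker_names):
--     """Re-map existing SPEAKER_XX labels to custom names (for cached data)."""
--     # Collect unique speaker labels in order of first appearance
--     seen = []
--     for seg in segments:
--         spk = seg.get("speaker", "")
--         if spk and spk != "UNKNOWN" and spk not in seen:
--             seen.append(spk)
--
--     # Build rename map
--     rename_map = {}
--     for i, old_name in enumerate(seen):
--         if i < len(speaker_names):
--             rename_map[old_name] = speaker_names[i]
--
--     if not rename_map:
--         return segments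
--
--     for seg in segments:
--         spk = seg.get("speaker", "")
--         if spk in rename_map:
--             seg["speaker"] = rename_map[spk]
--
--     return segments
-- ===== SOURCE B (Python) =====
-- def rename_speakers(segments, speaker_names):
--     """Re-map existing SPEAKER_XX labels to custom names (for cached data)."""
--     # Single fused pass: each speaker's new name is fixed at its first appearance
--     # (popped off a queue of unassigned names), and every segment is renamed as it
--     # is encountered -- no separate collect / map-build / rewrite stages.
--     names = list(speaker_names)  # queue of not-yet-assigned names
--     rename_map = {}
--     for seg in segments:
--         spk = seg.get("speaker", "")
--         if spk and spk != "UNKNOWN" and spk not in rename_map and names: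
--             rename_map[spk] = names.pop(0)
--         if spk in rename_map:
--             seg["speaker"] = rename_map[spk]
--     return segments
-- ===== Notes on version B (the rewrite author's own statement) =====
-- stated objective: simpler
-- what changed: B is one fused pass over segments that renames each segment as it is first encountered, assigning names popped off a queue at a speaker's first appearance, instead of A's three staged passes (collect seen list, enumerate it into a map, rewrite).
import Mathlib
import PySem

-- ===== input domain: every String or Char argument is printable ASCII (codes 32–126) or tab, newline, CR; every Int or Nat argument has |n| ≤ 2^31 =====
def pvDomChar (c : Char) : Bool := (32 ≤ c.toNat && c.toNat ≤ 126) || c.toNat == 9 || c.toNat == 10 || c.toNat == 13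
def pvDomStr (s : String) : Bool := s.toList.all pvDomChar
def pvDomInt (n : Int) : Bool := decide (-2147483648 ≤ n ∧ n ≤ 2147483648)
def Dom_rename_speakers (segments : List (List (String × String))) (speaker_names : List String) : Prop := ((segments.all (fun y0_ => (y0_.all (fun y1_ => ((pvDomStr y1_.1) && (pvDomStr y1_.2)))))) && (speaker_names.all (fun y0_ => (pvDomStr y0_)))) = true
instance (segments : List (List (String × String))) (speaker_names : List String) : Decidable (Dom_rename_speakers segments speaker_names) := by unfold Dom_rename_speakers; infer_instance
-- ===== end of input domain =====

-- B replaces A's three staged passes (collect `seen`, enumerate it into a map, rewrite) by ONE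
-- fused pass that assigns names from a queue at a speaker's first appearance and renames each
-- segment as it is encountered; equivalence is about the RETURN value (both Pythons perform
-- the same in-place update of the segment dicts).

-- ===== PORT A =====
-- seg.get("speaker", "")
def pvSpk (seg : List (String × String)) : String := (PySem.Dict.mk seg).getD "speaker" ""

-- body of A's first loop (collect unique valid speakers in first-appearance order)
def pvSeenStep (seen : List String) (seg : List (String × String)) : List String :=
  let spk := pvSpk seg
  if spk ≠ "" ∧ spk ≠ "UNKNOWN" ∧ spk ∉ seen then seen ++ [spk] else seen

-- body of A's second loop (over enumerate(seen)): build the rename map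
def pvMapStepA (speaker_names : List String) (m : PySem.Dict String String) (p : Int × String) :
    PySem.Dict String String :=
  if p.1 < (speaker_names.length : Int) then
    m.insert p.2 (PySem.List.pyGetD speaker_names p.1 "") else m

-- body of A's final loop: seg["speaker"] = rename_map[spk] when spk in rename_map
def pvApply (rename_map : PySem.Dict String String) (seg : List (String × String)) :
    List (String × String) :=
  if rename_map.contains (pvSpk seg) then
    ((PySem.Dict.mk seg).insert "speaker" (rename_map.getD (pvSpk seg) "")).items
  else seg

def rename_speakers (segments : List (List (String × String))) (speaker_names : List String) :
    List (List (String × String)) :=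
  let seen := segments.foldl pvSeenStep []
  let rename_map := (PySem.List.enumerate seen 0).foldl (pvMapStepA speaker_names) (PySem.Dict.mk [])
  if rename_map.size = 0 then segments
  else segments.map (pvApply rename_map)

-- ===== PORT B =====
-- body of B's single loop: state = (rewritten segments so far, rename_map, queue of unassigned names)
def pvBStep (st : List (List (String × String)) × PySem.Dict String String × List String)
    (seg : List (String × String)) :
    List (List (String × String)) × PySem.Dict String String × List String :=
  let spk := pvSpk seg
  let p : PySem.Dict String String × List String :=
    if spk ≠ "" ∧ spk ≠ "UNKNOWN" ∧ st.2.1.contains spk = false ∧ st.2.2 ≠ [] then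
      (st.2.1.insert spk (st.2.2.headD ""), st.2.2.tail)   -- rename_map[spk] = names.pop(0)
    else st.2
  let seg' := if p.1.contains spk then
      ((PySem.Dict.mk seg).insert "speaker" (p.1.getD spk "")).items
    else seg
  (st.1 ++ [seg'], p)

def rename_speakers_alt (segments : List (List (String × String))) (speaker_names : List String) :
    List (List (String × String)) :=
  (segments.foldl pvBStep ([], PySem.Dict.mk [], speaker_names)).1

-- ===== PRECONDITION & SPEC =====
def Spec_rename_speakers (segments : List (List (String × String))) (speaker_names : List String) (out : List (List (String × String))) : Prop := out = rename_speakers_alt segments speaker_names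
instance (segments : List (List (String × String))) (speaker_names : List String) (out : List (List (String × String))) : Decidable (Spec_rename_speakers segments speaker_names out) := by unfold Spec_rename_speakers; infer_instance

-- ===== CLAIM (what is proved, stated in full; the proofs are below) =====
def Claim_equal_rename_speakers : Prop := ∀ (segments : List (List (String × String))) (speaker_names : List String), Dom_rename_speakers segments speaker_names → Spec_rename_speakers segments speaker_names (rename_speakers segments speaker_names)

-- ===== LEMMAS AND PROOFS =====

-- first components of a zip are a take
theorem pv_map_fst_zip (l ns : List String) : (l.zip ns).map Prod.fst = l.take ns.length := by
  induction l generalizing ns with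
  | nil => simp
  | cons x xs ih => cases ns with
    | nil => simp
    | cons n ns' => simp [ih]

theorem pv_zip_snoc_lt (l : List String) (x : String) (ns : List String)
    (h : l.length < ns.length) :
    (l ++ [x]).zip ns = l.zip ns ++ [(x, ns.getD l.length "")] := by
  induction l generalizing ns with
  | nil => cases ns with
    | nil => simp at h
    | cons n ns' => simp
  | cons y ys ih => cases ns with
    | nil => simp at h
    | cons n ns' =>
      simp only [List.cons_append, List.zip_cons_cons, List.length_cons]
      rw [ih ns' (by simpa using h)]
      simp

theorem pv_zip_snoc_ge (l : List String) (x : String) (ns : List String)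
    (h : ns.length ≤ l.length) : (l ++ [x]).zip ns = l.zip ns := by
  induction l generalizing ns with
  | nil =>
    cases ns with
    | nil => simp
    | cons n ns' => simp at h
  | cons y ys ih => cases ns with
    | nil => simp
    | cons n ns' => simp [ih ns' (by simpa using h)]

-- A's seen list stays without duplicates
theorem pv_seen_nodup (segs : List (List (String × String))) (seen0 : List String)
    (h : seen0.Nodup) : (segs.foldl pvSeenStep seen0).Nodup := by
  induction segs generalizing seen0 with
  | nil => simpa
  | cons s ss ih =>
    apply ih
    unfold pvSeenStep
    dsimp only
    split_ifs with hc
    · simp only [List.nodup_append, List.nodup_singleton, true_and]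
      refine ⟨h, ?_⟩
      intro a ha e he eq
      simp only [List.mem_singleton] at he
      subst he; subst eq
      exact hc.2.2 ha
    · exact h

-- the seen list only grows (by appends at the back)
theorem pv_seen_prefix (segs : List (List (String × String))) (seen0 : List String) :
    seen0 <+: segs.foldl pvSeenStep seen0 := by
  induction segs generalizing seen0 with
  | nil => exact List.prefix_rfl
  | cons s ss ih =>
    refine List.IsPrefix.trans ?_ (ih (pvSeenStep seen0 s))
    unfold pvSeenStep
    dsimp only
    split_ifs
    · exact List.prefix_append _ _
    · exact List.prefix_rfl

-- every member of the seen list was there initially or is a valid speaker label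
theorem pv_seen_valid (segs : List (List (String × String))) (seen0 : List String)
    (x : String) (hx : x ∈ segs.foldl pvSeenStep seen0) :
    x ∈ seen0 ∨ (x ≠ "" ∧ x ≠ "UNKNOWN") := by
  induction segs generalizing seen0 with
  | nil => exact Or.inl hx
  | cons s ss ih =>
    rcases ih (pvSeenStep seen0 s) hx with h | h
    · unfold pvSeenStep at h
      dsimp only at h
      split_ifs at h with hc
      · rcases List.mem_append.mp h with h | h
        · exact Or.inl h
        · simp only [List.mem_singleton] at h
          exact Or.inr ⟨h ▸ hc.1, h ▸ hc.2.1⟩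
      · exact Or.inl h
    · exact Or.inr h

-- past the end of speaker_names, A's map loop does nothing
theorem pv_mapA_dead (names : List String) (xs : List String) (s : Nat) (m : PySem.Dict String String)
    (h : names.length ≤ s) :
    (PySem.List.enumerate xs (s : Int)).foldl (pvMapStepA names) m = m := by
  induction xs generalizing s m with
  | nil => simp [PySem.List.enumerate_nil]
  | cons x xs ih =>
    rw [PySem.List.enumerate_cons, List.foldl_cons]
    have hg : ¬ ((s : Int) < (names.length : Int)) := by exact_mod_cast not_lt.mpr h
    have : pvMapStepA names m ((s : Int), x) = m := by simp [pvMapStepA, hg]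
    rw [this]
    have := ih (s + 1) m (by omega)
    simpa using this

-- A's enumerate-fold builds exactly the zip of seen with the remaining names
theorem pv_mapA_items (names : List String) (seen : List String) (s : Nat)
    (m : PySem.Dict String String) (hnd : seen.Nodup)
    (hfresh : ∀ x ∈ seen, m.contains x = false) :
    ((PySem.List.enumerate seen (s : Int)).foldl (pvMapStepA names) m).items
      = m.items ++ seen.zip (names.drop s) := by
  induction seen generalizing s m with
  | nil => simp [PySem.List.enumerate_nil]
  | cons x xs ih =>
    rw [PySem.List.enumerate_cons, List.foldl_cons]
    by_cases hs : s < names.length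
    · have hg : ((s : Int) < (names.length : Int)) := by exact_mod_cast hs
      have hstep : pvMapStepA names m ((s : Int), x) = m.insert x (names.getD s "") := by
        simp [pvMapStepA, hg, PySem.List.pyGetD_natCast]
      rw [hstep]
      have hx : m.contains x = false := hfresh x (by simp)
      have hfresh' : ∀ y ∈ xs, (m.insert x (names.getD s "")).contains y = false := by
        intro y hy
        have hyx : y ≠ x := by
          intro e; exact (List.nodup_cons.mp hnd).1 (e ▸ hy)
        rw [PySem.Dict.contains_insert]
        simp [hyx, hfresh y (by simp [hy])]
      have := ih (s + 1) (m.insert x (names.getD s "")) (List.nodup_cons.mp hnd).2 hfresh'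
      have hcast : ((s : Int) + 1) = (((s + 1 : Nat)) : Int) := by push_cast; ring
      rw [hcast, this, PySem.Dict.items_insert_of_not_contains _ _ hx]
      have hdrop : names.drop s = names.getD s "" :: names.drop (s + 1) := by
        rw [List.drop_eq_getElem_cons hs]
        simp [List.getD_eq_getElem?_getD, List.getElem?_eq_getElem hs]
      rw [hdrop]
      simp
    · have hdead := pv_mapA_dead names xs (s + 1) (pvMapStepA names m ((s : Int), x)) (by omega)
      have hcast : ((s : Int) + 1) = (((s + 1 : Nat)) : Int) := by push_cast; ring
      rw [hcast, hdead]
      have hstep : pvMapStepA names m ((s : Int), x) = m := by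
        have hg : ¬ ((s : Int) < (names.length : Int)) := by exact_mod_cast hs
        simp [pvMapStepA, hg]
      rw [hstep, List.drop_eq_nil_of_le (by omega)]
      simp

-- contains on a zip-built dict is membership in the truncated seen list
theorem pv_contains_zip (seen names : List String) (spk : String) :
    (PySem.Dict.mk (seen.zip names)).contains spk = decide (spk ∈ seen.take names.length) := by
  rw [PySem.Dict.contains_eq_decide_mem_keys]
  simp [PySem.Dict.keys, pv_map_fst_zip]

-- a key absent from the key list is absent from the zip dict
theorem pv_get?_zip_not_mem (s ns : List String) (spk : String) (h : spk ∉ s) :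
    (PySem.Dict.mk (s.zip ns)).get? spk = none := by
  induction s generalizing ns with
  | nil => rfl
  | cons x xs ih =>
    cases ns with
    | nil => rfl
    | cons n ns' =>
      rw [List.zip_cons_cons, PySem.Dict.get?_mk_cons]
      have hx : x ≠ spk := by intro e; exact h (e ▸ List.mem_cons_self)
      simp only [beq_iff_eq, hx, if_false]
      exact ih ns' (fun hm => h (List.mem_cons_of_mem _ hm))

-- a prefix of the (nodup) seen list gives the same lookup on keys it already covers
theorem pv_get?_zip_prefix (s' t ns : List String) (spk : String)
    (hnd : (s' ++ t).Nodup) (h : spk ∈ s' ∨ spk ∉ s' ++ t) :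
    (PySem.Dict.mk ((s' ++ t).zip ns)).get? spk = (PySem.Dict.mk (s'.zip ns)).get? spk := by
  induction s' generalizing ns with
  | nil =>
    simp only [List.nil_append] at h ⊢
    rcases h with h | h
    · exact absurd h (List.not_mem_nil)
    · rw [pv_get?_zip_not_mem _ _ _ h]; rfl
  | cons x xs ih =>
    cases ns with
    | nil => rfl
    | cons n ns' =>
      rw [List.cons_append, List.zip_cons_cons, List.zip_cons_cons,
        PySem.Dict.get?_mk_cons, PySem.Dict.get?_mk_cons]
      by_cases hx : x = spk
      · simp [hx]
      · simp only [beq_iff_eq, hx, if_false]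
        apply ih
        · exact (List.nodup_cons.mp (by simpa using hnd)).2
        · rcases h with h | h
          · rcases List.mem_cons.mp h with h | h
            · exact absurd h.symm hx
            · exact Or.inl h
          · exact Or.inr (fun hm => h (by simpa using Or.inr (by simpa using hm)))

-- hence the rewrite of one segment agrees between the current map and the final map
theorem pv_apply_prefix (s' t ns : List String) (seg : List (String × String))
    (hnd : (s' ++ t).Nodup) (h : pvSpk seg ∈ s' ∨ pvSpk seg ∉ s' ++ t) :
    pvApply (PySem.Dict.mk ((s' ++ t).zip ns)) seg = pvApply (PySem.Dict.mk (s'.zip ns)) seg := by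
  unfold pvApply
  have hget := pv_get?_zip_prefix s' t ns (pvSpk seg) hnd h
  rw [PySem.Dict.contains_eq_isSome_get?, PySem.Dict.contains_eq_isSome_get?, hget,
    PySem.Dict.getD_eq_get?_getD, PySem.Dict.getD_eq_get?_getD, hget]

-- one step of B's fused loop: the map/queue state tracks (zip of A's seen list with the names,
-- names not yet assigned)
theorem pv_B_state (ns seen0 : List String) (seg : List (String × String)) :
    (if pvSpk seg ≠ "" ∧ pvSpk seg ≠ "UNKNOWN" ∧
        (PySem.Dict.mk (seen0.zip ns)).contains (pvSpk seg) = false ∧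
        ns.drop (min seen0.length ns.length) ≠ [] then
      ((PySem.Dict.mk (seen0.zip ns)).insert (pvSpk seg)
          ((ns.drop (min seen0.length ns.length)).headD ""),
        (ns.drop (min seen0.length ns.length)).tail)
    else (PySem.Dict.mk (seen0.zip ns), ns.drop (min seen0.length ns.length)))
      = (PySem.Dict.mk ((pvSeenStep seen0 seg).zip ns),
         ns.drop (min (pvSeenStep seen0 seg).length ns.length)) := by
  by_cases hval : pvSpk seg ≠ "" ∧ pvSpk seg ≠ "UNKNOWN"
  · by_cases hmem : pvSpk seg ∈ seen0
    · -- already seen: both sides unchanged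
      have hs0' : pvSeenStep seen0 seg = seen0 := by
        unfold pvSeenStep; dsimp only; rw [if_neg]; simp [hmem]
      rw [hs0']
      by_cases hlt : seen0.length < ns.length
      · have hc : (PySem.Dict.mk (seen0.zip ns)).contains (pvSpk seg) = true := by
          rw [pv_contains_zip]
          simp [List.take_of_length_le (le_of_lt hlt), hmem]
        rw [if_neg]; simp [hc]
      · have hk : min seen0.length ns.length = ns.length := by omega
        rw [if_neg]; rw [hk]; simp
    · have hs0' : pvSeenStep seen0 seg = seen0 ++ [pvSpk seg] := by
        unfold pvSeenStep; dsimp only; rw [if_pos ⟨hval.1, hval.2, hmem⟩]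
      rw [hs0']
      by_cases hlt : seen0.length < ns.length
      · -- new speaker gets the next queued name
        have hk : min seen0.length ns.length = seen0.length := by omega
        have hc : (PySem.Dict.mk (seen0.zip ns)).contains (pvSpk seg) = false := by
          rw [pv_contains_zip]
          simp only [decide_eq_false_iff_not]
          intro hm; exact hmem (List.mem_of_mem_take hm)
        have hdrop : ns.drop seen0.length = ns.getD seen0.length "" :: ns.drop (seen0.length + 1) := by
          rw [List.drop_eq_getElem_cons hlt]
          simp [List.getD_eq_getElem?_getD, List.getElem?_eq_getElem hlt]
        rw [if_pos ⟨hval.1, hval.2, hc, by rw [hk, hdrop]; simp⟩, hk, hdrop]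
        have hins : (PySem.Dict.mk (seen0.zip ns)).insert (pvSpk seg) (ns.getD seen0.length "")
            = PySem.Dict.mk ((seen0 ++ [pvSpk seg]).zip ns) := by
          apply PySem.Dict.ext
          rw [PySem.Dict.items_insert_of_not_contains _ _ hc, pv_zip_snoc_lt seen0 _ ns hlt]
        have hmin : min (seen0 ++ [pvSpk seg]).length ns.length = seen0.length + 1 := by
          simp; omega
        rw [hmin]
        simpa [List.getD_eq_getElem?_getD] using hins
      · -- names exhausted: map unchanged
        have hk : min seen0.length ns.length = ns.length := by omega
        have hmin : min (seen0 ++ [pvSpk seg]).length ns.length = ns.length := by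
          simp; omega
        rw [if_neg (by rw [hk]; simp), hk, hmin,
          pv_zip_snoc_ge seen0 _ ns (by omega)]
  · have hs0' : pvSeenStep seen0 seg = seen0 := by
      unfold pvSeenStep; dsimp only; rw [if_neg]; intro h; exact hval ⟨h.1, h.2.1⟩
    rw [hs0', if_neg]
    intro h; exact hval ⟨h.1, h.2.1⟩

-- B's single pass, started from an arbitrary already-seen state, produces A's rewrite with the
-- final map, and its running state is the zip of the current seen list with the names
theorem pv_B_run (ns : List String) (segs : List (List (String × String)))
    (seen0 : List String) (acc : List (List (String × String)))
    (h0 : seen0.Nodup) (hv : ∀ x ∈ seen0, x ≠ "" ∧ x ≠ "UNKNOWN") :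
    segs.foldl pvBStep (acc, PySem.Dict.mk (seen0.zip ns), ns.drop (min seen0.length ns.length))
      = (acc ++ segs.map (pvApply (PySem.Dict.mk ((segs.foldl pvSeenStep seen0).zip ns))),
         PySem.Dict.mk ((segs.foldl pvSeenStep seen0).zip ns),
         ns.drop (min (segs.foldl pvSeenStep seen0).length ns.length)) := by
  induction segs generalizing seen0 acc with
  | nil => simp
  | cons seg ss ih =>
    rw [List.foldl_cons, List.foldl_cons]
    set s0' := pvSeenStep seen0 seg with hs0'
    have hstep : pvBStep (acc, PySem.Dict.mk (seen0.zip ns), ns.drop (min seen0.length ns.length)) seg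
        = (acc ++ [pvApply (PySem.Dict.mk (s0'.zip ns)) seg],
           PySem.Dict.mk (s0'.zip ns), ns.drop (min s0'.length ns.length)) := by
      unfold pvBStep
      dsimp only
      rw [pv_B_state ns seen0 seg, ← hs0']
      rfl
    rw [hstep]
    have h0' : s0'.Nodup := by
      rw [hs0']; unfold pvSeenStep; dsimp only
      split_ifs with hc
      · simp only [List.nodup_append, List.nodup_singleton, true_and]
        exact ⟨h0, fun a ha e he eq => by
          simp only [List.mem_singleton] at he; subst he; subst eq; exact hc.2.2 ha⟩
      · exact h0
    have hv' : ∀ x ∈ s0', x ≠ "" ∧ x ≠ "UNKNOWN" := by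
      intro x hx
      rw [hs0'] at hx; unfold pvSeenStep at hx; dsimp only at hx
      split_ifs at hx with hc
      · rcases List.mem_append.mp hx with h | h
        · exact hv x h
        · simp only [List.mem_singleton] at h
          exact ⟨h ▸ hc.1, h ▸ hc.2.1⟩
      · exact hv x hx
    rw [ih s0' _ h0' hv']
    -- replace the head's rewrite (current map) by the final map
    obtain ⟨t, ht⟩ := pv_seen_prefix ss s0'
    have hndF : (s0' ++ t).Nodup := by
      rw [ht]; exact pv_seen_nodup ss s0' h0'
    have hcase : pvSpk seg ∈ s0' ∨ pvSpk seg ∉ s0' ++ t := by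
      by_cases hval : pvSpk seg ≠ "" ∧ pvSpk seg ≠ "UNKNOWN"
      · left
        rw [hs0']; unfold pvSeenStep; dsimp only
        split_ifs with hc
        · simp
        · push Not at hc
          exact hc hval.1 hval.2
      · right
        intro hm
        have := pv_seen_valid ss s0' (pvSpk seg) (ht ▸ hm)
        rcases this with h | h
        · exact hval (hv' _ h)
        · exact hval h
    have happ := pv_apply_prefix s0' t ns seg hndF hcase
    rw [ht] at happ
    rw [List.map_cons, ← happ]
    simp

-- ===== VERDICT (by name: the statement is the Claim_ definition above) =====
theorem rename_speakers_spec : Claim_equal_rename_speakers := by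
  intro segments names _
  unfold Spec_rename_speakers rename_speakers rename_speakers_alt
  dsimp only
  set seen := segments.foldl pvSeenStep [] with hseen
  have hnd : seen.Nodup := pv_seen_nodup segments [] List.nodup_nil
  have hA : (PySem.List.enumerate seen 0).foldl (pvMapStepA names) (PySem.Dict.mk [])
      = PySem.Dict.mk (seen.zip names) := by
    apply PySem.Dict.ext
    have := pv_mapA_items names seen 0 (PySem.Dict.mk []) hnd (by intro x _; rfl)
    simpa using this
  have hB : (segments.foldl pvBStep ([], PySem.Dict.mk [], names)).1
      = segments.map (pvApply (PySem.Dict.mk (seen.zip names))) := by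
    have := pv_B_run names segments [] [] List.nodup_nil (by intro x hx; cases hx)
    simp only [List.zip_nil_left, List.length_nil, Nat.zero_min, List.drop_zero] at this
    rw [this]
    simp [hseen]
  rw [hA, hB]
  by_cases hz : (PySem.Dict.mk (seen.zip names)).size = 0
  · have hempty : seen.zip names = [] := by
      have : (seen.zip names).length = 0 := hz
      exact List.eq_nil_of_length_eq_zero this
    rw [if_pos hz, hempty]
    have : ∀ seg, pvApply (PySem.Dict.mk []) seg = seg := by
      intro seg
      unfold pvApply
      simp [PySem.Dict.contains_mk]
    calc segments = segments.map id := (List.map_id segments).symm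
      _ = segments.map (pvApply (PySem.Dict.mk [])) := by
          apply List.map_congr_left; intro seg _; rw [this seg]; rfl
  · rw [if_neg hz]
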